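-- pv_equiv track=rewrite | github.com/Kizunad/ChestCavityForge | scripts/generate_guzhenren_docs.py | iter_target_groups
-- ===== SOURCE A (Python) =====
-- from typing import Dict, Iterable, List, Sequence
--
-- ALL_GROUPS: Sequence[str] = ("animal", "gu_cai", "human")
--
-- DEFAULT_GROUPS: Sequence[str] = ("animal",)
--
-- def iter_target_groups(groups: Iterable[str]) -> List[str]:
--     selected = list(dict.fromkeys(groups))
--     normalized: List[str] = []
--     for group in selected:
--         if group == "all":
--             normalized.extend(ALL_GROUPS)
--         else:
--             normalized.append(group)
--     # Preserve order but deduplicate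
--     seen = set()
--     ordered: List[str] = []
--     for g in normalized:
--         if g not in ALL_GROUPS:
--             raise SystemExit(f"[error] 不支持的分组：{g}")
--         if g not in seen:
--             seen.add(g)
--             ordered.append(g)
--     return ordered or list(DEFAULT_GROUPS)
-- ===== SOURCE B (Python) =====
-- from typing import Iterable, List, Sequence
--
-- ALL_GROUPS: Sequence[str] = ("animal", "gu_cai", "human")
--
-- DEFAULT_GROUPS: Sequence[str] = ("animal",)
--
-- def iter_target_groups(groups: Iterable[str]) -> List[str]:
--     groups = list(groups)
--     for g in groups:
--         if g != "all" and g not in ALL_GROUPS: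
--             raise SystemExit(f"[error] 不支持的分组：{g}")
--     # Build the result back-to-front: fold from the right, prepending each
--     # group's expansion and dropping any later occurrences of its elements.
--     # No seen-set, no input dedup, no intermediate normalized list.
--     ordered: List[str] = []
--     for g in reversed(groups):
--         exp = ALL_GROUPS if g == "all" else (g,)
--         ordered = list(exp) + [y for y in ordered if y not in exp]
--     return ordered or list(DEFAULT_GROUPS)
-- ===== Notes on version B (the rewrite author's own statement) =====
-- stated objective: alternative
-- what changed: B validates up front and then builds the result by a right fold (back-to-front): each group's expansion is prepended and its elements are dropped from the already-built suffix, so there is no input dedup, no seen-set and no intermediate normalized list.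
import Mathlib
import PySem

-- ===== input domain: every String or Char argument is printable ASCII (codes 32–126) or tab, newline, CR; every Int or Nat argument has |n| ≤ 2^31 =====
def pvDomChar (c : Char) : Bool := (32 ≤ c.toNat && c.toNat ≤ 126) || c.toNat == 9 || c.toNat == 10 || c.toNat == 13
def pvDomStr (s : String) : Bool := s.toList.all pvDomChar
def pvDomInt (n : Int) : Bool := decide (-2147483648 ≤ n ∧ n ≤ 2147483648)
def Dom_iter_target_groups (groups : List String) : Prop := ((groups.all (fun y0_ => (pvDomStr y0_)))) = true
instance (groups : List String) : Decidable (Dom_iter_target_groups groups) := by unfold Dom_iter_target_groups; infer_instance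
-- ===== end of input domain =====

-- B builds the result back-to-front with a right fold (prepend each group's expansion,
-- drop later occurrences), with a separate up-front validation pass; no input dedup,
-- no seen-set, no intermediate normalized list. Objective: alternative.
-- A raises SystemExit on unsupported group names; Pre_ excludes exactly those inputs.


def ALL_GROUPS : List String := ["animal", "gu_cai", "human"]
def DEFAULT_GROUPS : List String := ["animal"]

-- ===== PORT A =====
-- second loop of A: validate each g and append on first occurrence; none = SystemExit
def pyAValid : List String → PySem.Set String → List String → Option (List String)
  | [], _, ordered => some ordered
  | g :: rest, seen, ordered =>
    if ¬ (g ∈ ALL_GROUPS) then none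
    else if ¬ (PySem.Set.contains seen g) then pyAValid rest (PySem.Set.add seen g) (ordered ++ [g])
    else pyAValid rest seen ordered

def iter_target_groups (groups : List String) : List String :=
  let selected := PySem.List.dedup groups
  let normalized := selected.foldl (fun acc group => if group = "all" then acc ++ ALL_GROUPS else acc ++ [group]) []
  match pyAValid normalized PySem.Set.empty [] with
  | some ordered => if ordered = [] then DEFAULT_GROUPS else ordered
  | none => []  -- SystemExit in Python; excluded by Pre_

-- ===== PORT B =====
def iter_target_groups_alt (groups : List String) : List String :=
  -- first loop of Source B: validation (value-faithful: the loop only decides raise-or-not)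
  if groups.all (fun g => g == "all" || ALL_GROUPS.contains g) then
    -- 'for g in reversed(groups)' updating 'ordered' is a right fold over groups
    let ordered := groups.foldr
      (fun g acc =>
        let exp := if g = "all" then ALL_GROUPS else [g]
        exp ++ acc.filter (fun y => ¬ exp.contains y)) []
    if ordered = [] then DEFAULT_GROUPS else ordered
  else []  -- SystemExit in Python; excluded by Pre_

-- ===== PRECONDITION & SPEC =====
-- Pre_ excludes exactly the inputs on which Python A raises SystemExit:
-- some group is neither "all" nor a member of ALL_GROUPS.
def Pre_iter_target_groups (groups : List String) : Prop :=
  ∀ g ∈ groups, g = "all" ∨ g ∈ ALL_GROUPS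
instance (groups : List String) : Decidable (Pre_iter_target_groups groups) := by unfold Pre_iter_target_groups; infer_instance
def pvWitness_iter_target_groups : List String := ["all", "human", "animal"]

def Spec_iter_target_groups (groups : List String) (out : List String) : Prop := out = iter_target_groups_alt groups
instance (groups : List String) (out : List String) : Decidable (Spec_iter_target_groups groups out) := by unfold Spec_iter_target_groups; infer_instance

-- ===== CLAIM (what is proved, stated in full; the proofs are below) =====
def Claim_equal_iter_target_groups : Prop := ∀ (groups : List String), Dom_iter_target_groups groups → Pre_iter_target_groups groups → Spec_iter_target_groups groups (iter_target_groups groups)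

-- ===== LEMMAS AND PROOFS =====

-- canonical first-occurrence dedup, the common middle form of both programs
def fdedup : List String → List String
  | [] => []
  | x :: l => x :: (fdedup l).filter (fun y => y != x)

def expL (g : String) : List String := if g = "all" then ALL_GROUPS else [g]

-- A's 'normalized' foldl is a flatMap
lemma normalized_eq (l : List String) (acc : List String) :
    l.foldl (fun acc group => if group = "all" then acc ++ ALL_GROUPS else acc ++ [group]) acc
      = acc ++ l.flatMap expL := by
  induction l generalizing acc with
  | nil => simp
  | cons g rest ih =>
      simp only [List.foldl_cons, List.flatMap_cons, ih, expL]
      by_cases h : g = "all" <;> simp [h]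

lemma filter_filter_comm (p q : String → Bool) (l : List String) :
    (l.filter q).filter p = (l.filter p).filter q := by
  simp only [List.filter_filter]
  exact List.filter_congr (fun y _ => Bool.and_comm _ _)

lemma filter_ne_of_false (p : String → Bool) (x : String) (hx : p x = false) (l : List String) :
    (l.filter (fun y => y != x)).filter p = l.filter p := by
  rw [List.filter_filter]
  refine List.filter_congr (fun y _ => ?_)
  by_cases h : y = x
  · subst h; simp [hx]
  · simp [h]

lemma fdedup_filter (p : String → Bool) (l : List String) :
    fdedup (l.filter p) = (fdedup l).filter p := by
  induction l with
  | nil => rfl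
  | cons x t ih =>
      by_cases hx : p x
      · simp only [List.filter_cons, hx, if_pos trivial, fdedup, ih]
        rw [filter_filter_comm]
      · have hx' : p x = false := by simpa using hx
        simp only [List.filter_cons, hx', Bool.false_eq_true, if_false, fdedup, ih]
        exact (filter_ne_of_false p x hx' (fdedup t)).symm

lemma fdedup_append (a s : List String) :
    fdedup (a ++ s) = fdedup a ++ fdedup (s.filter (fun y => decide (y ∉ a))) := by
  induction a generalizing s with
  | nil => simp [fdedup]
  | cons x a' ih =>
      rw [List.cons_append, fdedup, ih, fdedup, List.filter_append]
      have hpush : (fdedup (s.filter (fun y => decide (y ∉ a')))).filter (fun y => y != x)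
          = fdedup (s.filter (fun y => decide (y ∉ x :: a'))) := by
        rw [← fdedup_filter, List.filter_filter]
        congr 1
        refine List.filter_congr (fun y _ => ?_)
        by_cases h : y = x
        · subst h; simp
        · simp [h]
      rw [hpush]
      rfl

lemma fdedup_append_subset (a b c : List String) (h : ∀ y ∈ b, y ∈ a) :
    fdedup (a ++ (b ++ c)) = fdedup (a ++ c) := by
  rw [fdedup_append, fdedup_append a c, List.filter_append]
  have hb : b.filter (fun y => decide (y ∉ a)) = [] := by
    simp only [List.filter_eq_nil_iff]
    intro y hy
    simpa using h y hy
  rw [hb, List.nil_append]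

-- deduping the input before expanding does not change the deduped expansion
lemma fdedup_flatMap_foldl_add (l s : List String) :
    fdedup ((l.foldl PySem.Set.add s).flatMap expL) = fdedup (s.flatMap expL ++ l.flatMap expL) := by
  induction l generalizing s with
  | nil => simp
  | cons x t ih =>
      rw [List.foldl_cons, ih, List.flatMap_cons]
      by_cases hx : x ∈ s
      · have hadd : PySem.Set.add s x = s := by simp [PySem.Set.add, hx]
        rw [hadd]
        refine (fdedup_append_subset (s.flatMap expL) (expL x) (t.flatMap expL) ?_).symm
        intro y hy
        exact List.mem_flatMap.mpr ⟨x, hx, hy⟩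
      · have hadd : PySem.Set.add s x = s ++ [x] := by simp [PySem.Set.add, hx]
        rw [hadd, List.flatMap_append, List.append_assoc]
        simp

lemma fdedup_dedup_flatMap (groups : List String) :
    fdedup ((PySem.List.dedup groups).flatMap expL) = fdedup (groups.flatMap expL) := by
  have h := fdedup_flatMap_foldl_add groups []
  simpa [PySem.List.dedup_eq_ofList, PySem.Set.ofList_eq_foldl] using h

-- contains on an added element
lemma contains_add (s : PySem.Set String) (x y : String) :
    PySem.Set.contains (PySem.Set.add s x) y = (PySem.Set.contains s y || y == x) := by
  simp only [PySem.Set.add, PySem.Set.contains]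
  split
  · rename_i h
    by_cases hyx : y = x
    · subst hyx; simpa using h
    · simp [hyx]
  · by_cases hyx : y = x <;> simp [hyx]

-- A's validation loop computes first-occurrence dedup of the unseen elements
lemma pyAValid_eq (l : List String) (seen : PySem.Set String) (ordered : List String)
    (hv : ∀ g ∈ l, g ∈ ALL_GROUPS) :
    pyAValid l seen ordered
      = some (ordered ++ fdedup (l.filter (fun g => ¬ PySem.Set.contains seen g))) := by
  induction l generalizing seen ordered with
  | nil => simp [pyAValid, fdedup]
  | cons g rest ih =>
      have hg : g ∈ ALL_GROUPS := hv g (List.mem_cons_self)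
      rw [pyAValid, if_neg (by simpa using hg)]
      by_cases hc : PySem.Set.contains seen g
      · rw [if_neg (by simpa using hc)]
        rw [ih seen ordered (fun x hx => hv x (List.mem_cons_of_mem _ hx))]
        have : (List.filter (fun g => decide ¬PySem.Set.contains seen g = true) (g :: rest))
            = List.filter (fun g => decide ¬PySem.Set.contains seen g = true) rest := by
          simp only [List.filter_cons]
          have : g ∈ seen := by simpa using hc
          simp [this]
        rw [this]
      · rw [if_pos (by simpa using hc)]
        rw [ih (PySem.Set.add seen g) (ordered ++ [g]) (fun x hx => hv x (List.mem_cons_of_mem _ hx))]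
        have hfix : rest.filter (fun y => ¬ PySem.Set.contains (PySem.Set.add seen g) y)
            = (rest.filter (fun y => ¬ PySem.Set.contains seen y)).filter (fun y => y != g) := by
          rw [List.filter_filter]
          refine List.filter_congr (fun y _ => ?_)
          rw [contains_add]
          by_cases h : y = g <;> simp [h]
        rw [hfix]
        have hcons : (List.filter (fun g => decide ¬PySem.Set.contains seen g = true) (g :: rest))
            = g :: List.filter (fun g => decide ¬PySem.Set.contains seen g = true) rest := by
          have : g ∉ seen := by simpa using hc
          simp [this]
        rw [hcons, fdedup, ← fdedup_filter, List.append_assoc]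
        rfl

-- B's right fold computes first-occurrence dedup of the expansion
lemma foldr_eq_fdedup (groups : List String) :
    groups.foldr
        (fun g acc =>
          let exp := if g = "all" then ALL_GROUPS else [g]
          exp ++ acc.filter (fun y => ¬ exp.contains y)) []
      = fdedup (groups.flatMap expL) := by
  induction groups with
  | nil => simp [fdedup]
  | cons g t ih =>
      rw [List.foldr_cons, ih, List.flatMap_cons, fdedup_append]
      show expL g ++ (fdedup (t.flatMap expL)).filter (fun y => ¬ (expL g).contains y)
          = fdedup (expL g) ++ fdedup ((t.flatMap expL).filter (fun y => decide (y ∉ expL g)))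
      have hfd : fdedup (expL g) = expL g := by
        unfold expL
        by_cases h : g = "all"
        · simp only [h, if_pos trivial]; decide
        · simp [h, fdedup]
      have hfilt : (fdedup (t.flatMap expL)).filter (fun y => ¬ (expL g).contains y)
          = fdedup ((t.flatMap expL).filter (fun y => decide (y ∉ expL g))) := by
        rw [fdedup_filter]
        refine List.filter_congr (fun y _ => ?_)
        by_cases h : y ∈ expL g <;> simp [h]
      rw [hfilt, hfd]

-- under Pre_, every expanded element is a supported group
lemma flatMap_valid (l : List String) (h : ∀ g ∈ l, g = "all" ∨ g ∈ ALL_GROUPS) :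
    ∀ y ∈ l.flatMap expL, y ∈ ALL_GROUPS := by
  intro y hy
  rcases List.mem_flatMap.mp hy with ⟨x, hx, hyx⟩
  rcases h x hx with h' | h'
  · simpa [expL, h'] using hyx
  · have hne : x ≠ "all" := by
      intro he; subst he; revert h'; decide
    simp only [expL, if_neg hne, List.mem_singleton] at hyx
    subst hyx; exact h'

-- ===== VERDICT (by name: the statement is the Claim_ definition above) =====
theorem iter_target_groups_spec : Claim_equal_iter_target_groups := by
  intro groups _ hpre
  show iter_target_groups groups = iter_target_groups_alt groups
  have hall : groups.all (fun g => g == "all" || ALL_GROUPS.contains g) = true := by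
    rw [List.all_eq_true]
    intro g hg
    rcases hpre g hg with h | h <;> simp [h]
  have hvalid : ∀ y ∈ (PySem.List.dedup groups).flatMap expL, y ∈ ALL_GROUPS := by
    refine flatMap_valid _ (fun g hg => hpre g ?_)
    exact (PySem.List.mem_dedup _ _).mp hg
  unfold iter_target_groups iter_target_groups_alt
  rw [if_pos hall]
  simp only [normalized_eq, List.nil_append]
  rw [pyAValid_eq _ _ _ hvalid]
  have hnoseen : ((PySem.List.dedup groups).flatMap expL).filter
      (fun g => ¬ PySem.Set.contains PySem.Set.empty g) = (PySem.List.dedup groups).flatMap expL := by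
    refine List.filter_eq_self.mpr (fun y _ => ?_)
    simp [PySem.Set.empty, PySem.Set.contains]
  rw [hnoseen, fdedup_dedup_flatMap, foldr_eq_fdedup]
  simp
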